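-- pv_equiv track=rewrite | github.com/pierky/arouteserver | utils/make_general.py | expand_keys
-- ===== SOURCE A (Python) =====
-- def expand_keys(keys):
--     res = ""
--     for key_idx in range(len(keys)):
--         if key_idx > 0:
--             if key_idx == len(keys) - 1:
--                 res += " and "
--             else:
--                 res += ", "
--         res += "``{}``".format(keys[key_idx])
--     return res
-- ===== SOURCE B (Python) =====
-- def expand_keys(keys):
--     parts = ["``{}``".format(k) for k in keys]
--     if len(parts) < 2:
--         return "".join(parts)
--     return ", ".join(parts[:-1]) + " and " + parts[-1]
-- ===== Notes on version B (the rewrite author's own statement) =====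
-- stated objective: simpler
-- what changed: Replaces the index-driven loop with per-position separator branching by a format-then-join decomposition: map keys to backticked parts, then assemble via ', '.join over parts[:-1] plus ' and ' plus the last part.
import Mathlib
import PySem

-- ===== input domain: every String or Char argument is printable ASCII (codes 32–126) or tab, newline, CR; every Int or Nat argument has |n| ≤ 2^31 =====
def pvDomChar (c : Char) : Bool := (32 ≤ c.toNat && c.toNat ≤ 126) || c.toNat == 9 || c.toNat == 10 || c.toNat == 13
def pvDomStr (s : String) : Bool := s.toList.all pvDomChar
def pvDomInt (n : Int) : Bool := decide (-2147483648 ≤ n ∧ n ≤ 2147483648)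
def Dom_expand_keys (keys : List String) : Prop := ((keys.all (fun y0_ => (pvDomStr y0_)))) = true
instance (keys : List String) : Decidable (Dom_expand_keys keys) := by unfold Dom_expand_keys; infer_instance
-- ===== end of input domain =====

-- B replaces A's index-driven loop with per-position separator branching by a simpler
-- format-then-join decomposition (map to backticked parts, then join all-but-last with ", "
-- and append " and " + last); proved to return the same string on every input.


-- ===== PORT A =====
def expand_keys (keys : List String) : String :=
  (PySem.List.pyRange 0 (PySem.List.len keys) 1).foldl
    (fun res key_idx =>
      let res :=
        if key_idx > 0 then
          if key_idx = PySem.List.len keys - 1 then res ++ " and " else res ++ ", "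
        else res
      res ++ ("``" ++ PySem.List.pyGetD keys key_idx "" ++ "``")) ""

-- ===== PORT B =====
def expand_keys_alt (keys : List String) : String :=
  let parts := keys.map (fun k => "``" ++ k ++ "``")
  if parts.length < 2 then
    PySem.Str.join "" parts
  else
    PySem.Str.join ", " (PySem.List.slice parts none (some (-1))) ++ " and "
      ++ PySem.List.pyGetD parts (-1) ""

-- ===== PRECONDITION & SPEC =====
def Spec_expand_keys (keys : List String) (out : String) : Prop := out = expand_keys_alt keys
instance (keys : List String) (out : String) : Decidable (Spec_expand_keys keys out) := by unfold Spec_expand_keys; infer_instance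

-- ===== CLAIM (what is proved, stated in full; the proofs are below) =====
def Claim_equal_expand_keys : Prop := ∀ (keys : List String), Dom_expand_keys keys → Spec_expand_keys keys (expand_keys keys)

-- ===== LEMMAS AND PROOFS =====

/-- "``{}``".format(k) -/
def pvWrap (k : String) : String := "``" ++ k ++ "``"

/-- Concatenate a list of strings (the shape A's loop accumulates). -/
def pvCat (l : List String) : String := l.foldl (· ++ ·) ""

/-- The string A's loop body appends at index `i` when the full list is `keys`. -/
def pvItem (keys : List String) (i : Int) : String :=
  (if i > 0 then (if i = PySem.List.len keys - 1 then " and " else ", ") else "")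
    ++ pvWrap (PySem.List.pyGetD keys i "")

theorem pvFoldl_append_str (l : List String) : ∀ (acc : String),
    l.foldl (· ++ ·) acc = acc ++ l.foldl (· ++ ·) "" := by
  induction l with
  | nil => intro acc; simp
  | cons x t ih =>
      intro acc
      simp only [List.foldl_cons]
      rw [ih (acc ++ x), ih ("" ++ x), ← String.append_assoc]
      simp

theorem pvCat_cons (x : String) (l : List String) : pvCat (x :: l) = x ++ pvCat l := by
  simp only [pvCat, List.foldl_cons]
  rw [pvFoldl_append_str l ("" ++ x), pvFoldl_append_str l ""]
  simp

theorem pvCat_append_singleton (l : List String) (x : String) :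
    pvCat (l ++ [x]) = pvCat l ++ x := by
  simp only [pvCat, List.foldl_append, List.foldl_cons, List.foldl_nil]

theorem pvA_eq_cat (keys : List String) :
    expand_keys keys = pvCat ((PySem.List.pyRange 0 (PySem.List.len keys) 1).map (pvItem keys)) := by
  unfold expand_keys
  have hstep : ∀ (l : List Int) (acc : String),
      l.foldl (fun res key_idx =>
        (if key_idx > 0 then
          if key_idx = PySem.List.len keys - 1 then res ++ " and " else res ++ ", "
         else res) ++ ("``" ++ PySem.List.pyGetD keys key_idx "" ++ "``")) acc
      = acc ++ pvCat (l.map (pvItem keys)) := by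
    intro l
    induction l with
    | nil => intro acc; simp [pvCat]
    | cons i t ih =>
        intro acc
        simp only [List.foldl_cons, List.map_cons]
        rw [ih, pvCat_cons]
        have hbody : (if i > 0 then
              if i = PySem.List.len keys - 1 then acc ++ " and " else acc ++ ", "
            else acc) ++ ("``" ++ PySem.List.pyGetD keys i "" ++ "``")
            = acc ++ pvItem keys i := by
          unfold pvItem pvWrap
          split_ifs <;> simp [String.append_assoc]
        rw [hbody, String.append_assoc]
  exact hstep _ ""

/-- Chars-level: joining with `sep` after appending one more part. -/
theorem pvCharsJoin_append_singleton (sep : List Char) (x : List Char) :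
    ∀ (l : List (List Char)), l ≠ [] →
    PySem.Chars.join sep (l ++ [x]) = PySem.Chars.join sep l ++ sep ++ x := by
  intro l
  induction l with
  | nil => intro h; exact absurd rfl h
  | cons a t ih =>
      intro _
      cases t with
      | nil =>
          simp only [List.nil_append, List.cons_append]
          rw [PySem.Chars.join_cons_cons sep a x [], PySem.Chars.join_singleton,
              PySem.Chars.join_singleton]
      | cons b u =>
          have ih' := ih (by simp)
          simp only [List.cons_append] at ih' ⊢
          rw [PySem.Chars.join_cons_cons sep a b (u ++ [x]),
              PySem.Chars.join_cons_cons sep a b u, ih']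
          simp [List.append_assoc]

theorem pvJoin_append_singleton (sep : String) (l : List String) (x : String) (h : l ≠ []) :
    PySem.Str.join sep (l ++ [x]) = PySem.Str.join sep l ++ sep ++ x := by
  apply String.toList_inj.mp
  simp only [PySem.Str.toList_join, List.map_append, List.map_cons, List.map_nil,
    String.toList_append]
  exact pvCharsJoin_append_singleton sep.toList x.toList (l.map String.toList) (by simpa using h)

/-- The front part of A's output (indices `< l.length` of `l ++ rest`, `rest ≠ []`)
    is the comma-join of the wrapped front elements. -/
theorem pvFront (l : List String) : ∀ (rest : List String), rest ≠ [] →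
    pvCat ((PySem.List.pyRange 0 (l.length : Int) 1).map (pvItem (l ++ rest)))
      = PySem.Str.join ", " (l.map pvWrap) := by
  induction l using List.reverseRecOn with
  | nil =>
      intro rest _
      rw [PySem.List.pyRange_one_eq_nil (by simp)]
      apply String.toList_inj.mp
      simp [pvCat, PySem.Chars.join_nil]
  | append_singleton l y ih =>
      intro rest hrest
      have hlen : ((l ++ [y]).length : Int) = (l.length : Int) + 1 := by simp
      rw [hlen, PySem.List.pyRange_one_succ_right (by positivity), List.map_append,
        List.map_singleton, pvCat_append_singleton]
      have hassoc : (l ++ [y]) ++ rest = l ++ (y :: rest) := by simp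
      have hfront := ih (y :: rest) (by simp)
      rw [hassoc, hfront]
      have hitem : pvItem (l ++ (y :: rest)) (l.length : Int)
          = (if (l.length : Int) > 0 then ", " else "") ++ pvWrap y := by
        unfold pvItem
        have hne : ¬ ((l.length : Int) = PySem.List.len (l ++ (y :: rest)) - 1) := by
          have hr : (1 : Int) ≤ (rest.length : Int) := by
            have : 0 < rest.length := List.length_pos_iff.mpr hrest
            exact_mod_cast this
          simp only [PySem.List.len_eq, List.length_append, List.length_cons]
          push_cast
          omega
        have hget : PySem.List.pyGetD (l ++ (y :: rest)) (l.length : Int) "" = y := by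
          rw [PySem.List.pyGetD_natCast]
          simp
        rw [hget]
        split_ifs <;> rfl
      rw [hitem]
      cases l with
      | nil =>
          apply String.toList_inj.mp
          simp [PySem.Chars.join_nil, PySem.Chars.join_singleton]
      | cons a t =>
          have hpos : ((((a :: t).length : Int)) > 0) := by
            exact_mod_cast List.length_pos_iff.mpr (by simp)
          rw [if_pos hpos, List.map_append, List.map_singleton,
            pvJoin_append_singleton ", " ((a :: t).map pvWrap) (pvWrap y) (by simp),
            ← String.append_assoc]

theorem pvMain_long (l : List String) (x : String) (h : l ≠ []) :
    expand_keys (l ++ [x]) = PySem.Str.join ", " (l.map pvWrap) ++ " and " ++ pvWrap x := by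
  rw [pvA_eq_cat]
  have hlen : PySem.List.len (l ++ [x]) = (l.length : Int) + 1 := by simp
  rw [hlen, PySem.List.pyRange_one_succ_right (by positivity), List.map_append,
    List.map_singleton, pvCat_append_singleton, pvFront l [x] (by simp)]
  have hitem : pvItem (l ++ [x]) (l.length : Int) = " and " ++ pvWrap x := by
    unfold pvItem
    have hpos : ((l.length : Int) > 0) := by
      have : 0 < l.length := List.length_pos_iff.mpr h
      exact_mod_cast this
    have heq : (l.length : Int) = PySem.List.len (l ++ [x]) - 1 := by simp
    have hget : PySem.List.pyGetD (l ++ [x]) (l.length : Int) "" = x := by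
      rw [PySem.List.pyGetD_natCast]; simp
    rw [if_pos hpos, if_pos heq, hget]
  rw [hitem, ← String.append_assoc]

-- ===== VERDICT (by name: the statement is the Claim_ definition above) =====
theorem expand_keys_spec : Claim_equal_expand_keys := by
  intro keys _
  unfold Spec_expand_keys
  match keys with
  | [] =>
      apply String.toList_inj.mp
      simp [expand_keys, expand_keys_alt, PySem.List.pyRange_one_eq_nil (le_refl 0),
        PySem.Chars.join_nil]
  | [a] =>
      rw [pvA_eq_cat]
      have hl1 : PySem.List.len [a] = (1 : Int) := by simp
      rw [hl1, show PySem.List.pyRange 0 (1 : Int) 1 = [0] from by decide]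
      apply String.toList_inj.mp
      simp [expand_keys_alt, pvCat, pvItem, pvWrap, PySem.Chars.join_singleton,
        PySem.List.pyGetD]
  | a :: b :: t =>
      have hne : (a :: b :: t) ≠ [] := by simp
      have hsplit : (a :: b :: t).dropLast ++ [(a :: b :: t).getLast hne] = a :: b :: t :=
        List.dropLast_append_getLast hne
      rw [← hsplit, pvMain_long _ _ (by simp)]
      simp only [expand_keys_alt]
      rw [List.map_append, List.map_singleton]
      rw [if_neg (by simp)]
      rw [PySem.List.slice_to_neg_one, PySem.List.pyGetD_neg_one_append_singleton,
        List.dropLast_concat]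
      simp only [show pvWrap = fun k => "``" ++ k ++ "``" from rfl]
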